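-- pv_equiv track=rewrite | github.com/SrTangente/CN-A3 | clu_utils.py | generate_pajek_communities
-- ===== SOURCE A (Python) =====
-- def generate_pajek_communities(communities):
--     """Generate lines in Pajek communities format (.clu).
--     Parameters
--     ----------
--     communities : list
--        A communities list
--     References
--     ----------
--     See http://vlado.fmf.uni-lj.si/pub/networks/pajek/doc/draweps.htm
--     for format information.
--     """
--
--     # We need a copy of the communities to use the strategy of removing vertices
--     communities_list = [inner_list[:] for inner_list in communities]
--     nnodes = sum([len(vertex) for vertex in communities])
--
--     # Write first line
--     yield f"*Vertices {nnodes}"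
--
--     # We do not assume that vertices:
--     # - Starts with the number 1
--     # - Are correlative
--     # Therefore we will look for the minimum then pop it
--
--     for n in range(0, nnodes):
--         # We look for the minimum vertex number
--         vertex = min([min(item) for item in communities_list if item])
--
--         # We find the community this vertex belongs to
--         community = next(i for i, v in enumerate(communities_list) if vertex in v)
--
--         # We put the community number in the row corresponding to the vertex
--         # We add 1 because Pajek communities starts with number 1
--         yield f"{community + 1}"
--
--         # We remove this vertex from the communities structure
--         communities_list[community].remove(vertex)
-- ===== SOURCE B (Python) =====
-- def generate_pajek_communities(communities):
--     """Generate lines in Pajek communities format (.clu).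
--
--     Same output as the selection-based original, but built by sorting the
--     (vertex, community) pairs once instead of repeatedly scanning for the
--     minimum remaining vertex.
--     """
--     pairs = sorted((v, i) for i, comm in enumerate(communities) for v in comm)
--     yield f"*Vertices {len(pairs)}"
--     for _, i in pairs:
--         yield f"{i + 1}"
-- ===== Notes on version B (the rewrite author's own statement) =====
-- stated objective: faster
-- what changed: A repeatedly scans all remaining communities for the minimum vertex and removes it (selection-style, quadratic); B builds the (vertex, community) pairs once, sorts them, and emits the community numbers in sorted order.
import Mathlib
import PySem

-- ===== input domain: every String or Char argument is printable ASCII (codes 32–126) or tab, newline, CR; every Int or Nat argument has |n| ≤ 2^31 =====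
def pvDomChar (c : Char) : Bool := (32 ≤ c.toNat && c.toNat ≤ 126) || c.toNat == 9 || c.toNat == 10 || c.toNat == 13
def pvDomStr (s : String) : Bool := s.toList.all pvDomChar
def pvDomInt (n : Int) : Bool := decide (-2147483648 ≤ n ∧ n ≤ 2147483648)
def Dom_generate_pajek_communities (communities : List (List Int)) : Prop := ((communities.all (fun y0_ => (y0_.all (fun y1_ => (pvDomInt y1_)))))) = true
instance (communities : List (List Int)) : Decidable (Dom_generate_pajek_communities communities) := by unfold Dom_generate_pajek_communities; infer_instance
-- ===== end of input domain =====

-- B replaces A's quadratic select-minimum-and-remove loop by one sort of the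
-- (vertex, community) pairs; same yielded lines (the generator is ported as the
-- list of its yielded lines).

-- ===== PORT A =====
-- One iteration of A's `for n in range(0, nnodes)` loop, recursing on the remaining count.
def pvALoop : List (List Int) → Nat → List String
  | _, 0 => []
  | cl, k+1 =>
    -- vertex = min([min(item) for item in communities_list if item])
    match PySem.List.min? ((cl.filter (fun item => !item.isEmpty)).map
        (fun item => (PySem.List.min? item (fun x => x)).getD 0)) (fun x => x) with
    | none => []   -- Python: ValueError on min([]); unreachable (the loop runs exactly nnodes times)
    | some vertex =>
      -- community = next(i for i, v in enumerate(communities_list) if vertex in v)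
      match List.findIdx? (fun lst => lst.contains vertex) cl with
      | none => []   -- Python: StopIteration; unreachable (vertex was found in some community)
      | some community =>
        -- communities_list[community].remove(vertex); `.getD l` only totalises (vertex ∈ the list)
        PySem.Int.toStr ((community : Int) + 1) ::
          pvALoop (cl.modify community (fun l => (PySem.List.remove? l vertex).getD l)) k

def generate_pajek_communities (communities : List (List Int)) : List String :=
  let communities_list := communities   -- `[inner_list[:] for …]` copies; identity on immutable Lean lists
  let nnodes : Nat := (communities.map (fun vertex => vertex.length)).sum
  ("*Vertices " ++ PySem.Int.toStr (nnodes : Int)) :: pvALoop communities_list nnodes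

-- ===== PORT B =====
def generate_pajek_communities_alt (communities : List (List Int)) : List String :=
  -- pairs = sorted((v, i) for i, comm in enumerate(communities) for v in comm)
  let pairs := PySem.List.sorted2
      ((PySem.List.enumerate communities).flatMap (fun p => p.2.map (fun v => (v, p.1))))
      (fun p => p.1) (fun p => p.2) false
  ("*Vertices " ++ PySem.Int.toStr ((pairs.length : Int))) ::
    pairs.map (fun p => PySem.Int.toStr (p.2 + 1))

-- ===== PRECONDITION & SPEC =====
def Spec_generate_pajek_communities (communities : List (List Int)) (out : List String) : Prop := out = generate_pajek_communities_alt communities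
instance (communities : List (List Int)) (out : List String) : Decidable (Spec_generate_pajek_communities communities out) := by unfold Spec_generate_pajek_communities; infer_instance

-- ===== CLAIM (what is proved, stated in full; the proofs are below) =====
def Claim_equal_generate_pajek_communities : Prop := ∀ (communities : List (List Int)), Dom_generate_pajek_communities communities → Spec_generate_pajek_communities communities (generate_pajek_communities communities)

-- ===== LEMMAS AND PROOFS =====

-- The strict lexicographic "before" test that sorted2 uses on (vertex, community) pairs.
def pvBlt (a b : Int × Int) : Bool :=
  decide (a.1 < b.1) || (!decide (b.1 < a.1) && decide (a.2 < b.2))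

theorem pvBlt_false_iff (a b : Int × Int) :
    (pvBlt b a = false) ↔ (a.1 < b.1 ∨ (a.1 = b.1 ∧ a.2 ≤ b.2)) := by
  simp [pvBlt]; omega

theorem pvBlt_antisymm {a b : Int × Int} (h1 : pvBlt b a = false) (h2 : pvBlt a b = false) :
    a = b := by
  simp [pvBlt] at h1 h2
  have : a.1 = b.1 ∧ a.2 = b.2 := by omega
  exact Prod.ext this.1 this.2

theorem pvSorted2_eq_foldl (l : List (Int × Int)) :
    PySem.List.sorted2 l (fun p => p.1) (fun p => p.2) false
      = l.foldl (fun acc x => PySem.List.insertBy pvBlt x acc) [] := rfl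

theorem pvInsertBy_pairwise (x : Int × Int) : ∀ ys : List (Int × Int),
    ys.Pairwise (fun a b => pvBlt b a = false) →
    (PySem.List.insertBy pvBlt x ys).Pairwise (fun a b => pvBlt b a = false) := by
  intro ys
  induction ys with
  | nil => intro _; simp [PySem.List.insertBy]
  | cons y ys ih =>
    intro h
    rw [List.pairwise_cons] at h
    obtain ⟨hy, hys⟩ := h
    by_cases hb : pvBlt x y = true
    · simp only [PySem.List.insertBy, hb, if_true]
      rw [List.pairwise_cons]
      refine ⟨?_, List.pairwise_cons.mpr ⟨hy, hys⟩⟩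
      intro z hz
      rcases List.mem_cons.mp hz with rfl | hz
      · simp [pvBlt] at hb ⊢; omega
      · have hzy := hy z hz; simp [pvBlt] at hb hzy ⊢; omega
    · have hb' : pvBlt x y = false := by simpa using hb
      simp only [PySem.List.insertBy, hb', Bool.false_eq_true, if_false]
      rw [List.pairwise_cons]
      refine ⟨?_, ih hys⟩
      intro z hz
      rcases (PySem.List.mem_insertBy pvBlt x z ys).mp hz with rfl | hz
      · exact hb'
      · exact hy z hz

theorem pvSorted2_pairwise (l : List (Int × Int)) :
    (PySem.List.sorted2 l (fun p => p.1) (fun p => p.2) false).Pairwise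
      (fun a b => pvBlt b a = false) := by
  rw [pvSorted2_eq_foldl]
  suffices h : ∀ acc, acc.Pairwise (fun a b => pvBlt b a = false) →
      (l.foldl (fun acc x => PySem.List.insertBy pvBlt x acc) acc).Pairwise
        (fun a b => pvBlt b a = false) from h [] (by simp)
  induction l with
  | nil => intro acc hacc; simpa using hacc
  | cons x l ih => intro acc hacc; exact ih _ (pvInsertBy_pairwise x acc hacc)

-- Extracting the lexicographic minimum from sorted2.
theorem pvSorted2_min_extract {l : List (Int × Int)} {m : Int × Int}
    (hm : m ∈ l) (hmin : ∀ y ∈ l, pvBlt y m = false) :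
    PySem.List.sorted2 l (fun p => p.1) (fun p => p.2) false
      = m :: PySem.List.sorted2 (l.erase m) (fun p => p.1) (fun p => p.2) false := by
  apply List.Perm.eq_of_pairwise (le := fun a b => pvBlt b a = false)
  · intro a b _ _ h1 h2; exact pvBlt_antisymm h1 h2
  · exact pvSorted2_pairwise l
  · refine List.Pairwise.cons ?_ (pvSorted2_pairwise _)
    intro z hz
    have : z ∈ l.erase m := (PySem.List.sorted2_perm _ _ _ _).mem_iff.mp hz
    exact hmin z (List.mem_of_mem_erase this)
  · exact ((PySem.List.sorted2_perm _ _ _ _).trans (List.perm_cons_erase hm)).trans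
      (((PySem.List.sorted2_perm _ _ _ _).symm).cons m)

-- The (vertex, community) pairs of the remaining structure, communities numbered from s.
def pvPairsFrom (s : Int) : List (List Int) → List (Int × Int)
  | [] => []
  | c :: t => c.map (fun v => (v, s)) ++ pvPairsFrom (s + 1) t

theorem pvPairs_eq_pairsFrom (cl : List (List Int)) :
    ∀ s : Int, (PySem.List.enumerate cl s).flatMap (fun p => p.2.map (fun v => (v, p.1)))
      = pvPairsFrom s cl := by
  induction cl with
  | nil => intro s; simp [PySem.List.enumerate_nil, pvPairsFrom]
  | cons c t ih => intro s; simp [PySem.List.enumerate_cons, pvPairsFrom, ih]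

theorem pvPairsFrom_length (cl : List (List Int)) :
    ∀ s : Int, (pvPairsFrom s cl).length = (cl.map (fun l => l.length)).sum := by
  induction cl with
  | nil => intro s; simp [pvPairsFrom]
  | cons c t ih => intro s; simp [pvPairsFrom, ih]

theorem pvMem_pairsFrom (cl : List (List Int)) :
    ∀ (s : Int) (p : Int × Int), p ∈ pvPairsFrom s cl ↔
      ∃ (k : Nat) (h : k < cl.length), p.1 ∈ cl[k] ∧ p.2 = s + k := by
  induction cl with
  | nil => intro s p; simp [pvPairsFrom]
  | cons c t ih =>
    intro s p
    simp only [pvPairsFrom, List.mem_append, List.mem_map, ih]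
    constructor
    · rintro (⟨v, hv, rfl⟩ | ⟨k, hk, h1, h2⟩)
      · exact ⟨0, by simp, by simpa using hv, by simp⟩
      · exact ⟨k + 1, by simpa using hk, by simpa using h1, by omega⟩
    · rintro ⟨k, hk, h1, h2⟩
      match k with
      | 0 => exact Or.inl ⟨p.1, by simpa using h1, by simp at h2; exact Prod.ext rfl h2.symm⟩
      | k + 1 =>
        refine Or.inr ⟨k, by simpa using hk, by simpa using h1, by omega⟩

theorem pvPairsFrom_set_erase (cl : List (List Int)) :
    ∀ (s : Int) (c : Nat) (hc : c < cl.length) (v : Int), v ∈ cl[c] →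
      pvPairsFrom s (cl.set c (cl[c].erase v)) = (pvPairsFrom s cl).erase (v, s + c) := by
  induction cl with
  | nil => intro s c hc; simp at hc
  | cons x t ih =>
    intro s c hc v hv
    match c with
    | 0 =>
      simp only [List.getElem_cons_zero] at hv
      simp only [List.set_cons_zero, pvPairsFrom, Int.natCast_zero, add_zero]
      rw [List.erase_append_left (l₂ := pvPairsFrom (s+1) t)
            (List.mem_map.mpr ⟨v, hv, rfl⟩),
          List.map_erase (f := fun w => (w, s)) (fun a b h => by simpa [Prod.ext_iff] using h)]
      simp
    | c + 1 =>
      simp only [List.getElem_cons_succ] at hv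
      simp only [List.set_cons_succ, pvPairsFrom, List.getElem_cons_succ]
      rw [List.erase_append_right, ih (s + 1) c (by simpa using hc) v hv]
      · congr 2; push_cast; ring_nf
      · intro hmem
        rcases List.mem_map.mp hmem with ⟨w, _, hw⟩
        have h2 := congrArg Prod.snd hw
        simp at h2
        omega

-- A's selection step finds exactly the lexicographic minimum pair.
theorem pvALoop_eq_sorted (n : Nat) :
    ∀ cl : List (List Int), (pvPairsFrom 0 cl).length = n →
      pvALoop cl n = (PySem.List.sorted2 (pvPairsFrom 0 cl) (fun p => p.1) (fun p => p.2) false).map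
        (fun p => PySem.Int.toStr (p.2 + 1)) := by
  induction n with
  | zero =>
    intro cl h
    rw [List.length_eq_zero_iff] at h
    simp [pvALoop, h, pvSorted2_eq_foldl]
  | succ k ih =>
    intro cl hlen
    have hne : pvPairsFrom 0 cl ≠ [] := by
      intro h; rw [h] at hlen; simp at hlen
    obtain ⟨p, hp⟩ := List.exists_mem_of_ne_nil _ hne
    obtain ⟨k0, hk0, hpmem, _⟩ := (pvMem_pairsFrom cl 0 p).mp hp
    -- the list of per-community minima is nonempty, so Python's outer min returns a value
    obtain ⟨vertex, hvx⟩ : ∃ v, PySem.List.min?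
        ((cl.filter (fun item => !item.isEmpty)).map
          (fun item => (PySem.List.min? item (fun x => x)).getD 0)) (fun x => x) = some v := by
      cases hsome : PySem.List.min?
          ((cl.filter (fun item => !item.isEmpty)).map
            (fun item => (PySem.List.min? item (fun x => x)).getD 0)) (fun x => x) with
      | some v => exact ⟨v, rfl⟩
      | none =>
        rw [PySem.List.min?_eq_none_iff, List.map_eq_nil_iff, List.filter_eq_nil_iff] at hsome
        exact absurd (by simpa [List.isEmpty_iff] using hsome cl[k0] (List.getElem_mem hk0))
          (by intro h; rw [h] at hpmem; simp at hpmem)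
    -- the chosen vertex lies in some community and is ≤ every remaining vertex
    have hvmem : ∃ j, ∃ (hj : j < cl.length), vertex ∈ cl[j] := by
      have := PySem.List.min?_mem hvx
      obtain ⟨item, hitem, hv⟩ := List.mem_map.mp this
      obtain ⟨hin, hne'⟩ := List.mem_filter.mp hitem
      obtain ⟨m, hm⟩ : ∃ m, PySem.List.min? item (fun x => x) = some m := by
        cases h : PySem.List.min? item (fun x => x) with
        | some m => exact ⟨m, rfl⟩
        | none =>
          rw [PySem.List.min?_eq_none_iff] at h
          simp [h] at hne'
      obtain ⟨j, hj, rfl⟩ := List.mem_iff_getElem.mp hin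
      exact ⟨j, hj, by rw [hm] at hv; simpa [← hv] using PySem.List.min?_mem hm⟩
    have hvmin : ∀ j, ∀ (hj : j < cl.length), ∀ x ∈ cl[j], vertex ≤ x := by
      intro j hj x hx
      have hne' : cl[j].isEmpty = false := by
        rw [List.isEmpty_eq_false_iff_exists_mem]; exact ⟨x, hx⟩
      have hfil : cl[j] ∈ cl.filter (fun item => !item.isEmpty) :=
        List.mem_filter.mpr ⟨List.getElem_mem hj, by simp [hne']⟩
      obtain ⟨m, hm⟩ : ∃ m, PySem.List.min? cl[j] (fun x => x) = some m := by
        cases h : PySem.List.min? cl[j] (fun x => x) with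
        | some m => exact ⟨m, rfl⟩
        | none => rw [PySem.List.min?_eq_none_iff] at h; simp [h] at hne'
      have hmmins : m ∈ (cl.filter (fun item => !item.isEmpty)).map
          (fun item => (PySem.List.min? item (fun x => x)).getD 0) :=
        List.mem_map.mpr ⟨cl[j], hfil, by rw [hm]; rfl⟩
      exact le_trans (PySem.List.min?_isMin hvx m hmmins) (PySem.List.min?_isMin hm x hx)
    -- Python's next(...) finds the first community containing the vertex
    obtain ⟨community, hc⟩ : ∃ c, List.findIdx? (fun lst => lst.contains vertex) cl = some c := by
      obtain ⟨j, hj, hjv⟩ := hvmem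
      have : (List.findIdx? (fun lst => lst.contains vertex) cl).isSome := by
        rw [List.findIdx?_isSome]
        exact List.any_eq_true.mpr ⟨cl[j], List.getElem_mem hj, by simpa using hjv⟩
      exact Option.isSome_iff_exists.mp this
    obtain ⟨hclen, hcmem, hcfirst⟩ := List.findIdx?_eq_some_iff_getElem.mp hc
    have hcmem' : vertex ∈ cl[community] := by simpa using hcmem
    -- (vertex, community) is the lexicographic minimum pair
    have hmmem : (vertex, (community : Int)) ∈ pvPairsFrom 0 cl :=
      (pvMem_pairsFrom cl 0 _).mpr ⟨community, hclen, by simpa using hcmem', by simp⟩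
    have hmlex : ∀ q ∈ pvPairsFrom 0 cl, pvBlt q (vertex, (community : Int)) = false := by
      intro q hq
      obtain ⟨j, hj, h1, h2⟩ := (pvMem_pairsFrom cl 0 q).mp hq
      rw [pvBlt_false_iff]
      rcases lt_or_eq_of_le (hvmin j hj q.1 h1) with hlt | heq
      · exact Or.inl hlt
      · refine Or.inr ⟨heq, ?_⟩
        have hle : community ≤ j := by
          by_contra hcon
          exact (hcfirst j (by omega)) (by simpa [← heq] using h1)
        rw [h2]; simp; exact_mod_cast hle
    -- the modified structure has exactly the pairs with this minimum erased
    have hmod : cl.modify community (fun l => (PySem.List.remove? l vertex).getD l)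
        = cl.set community (cl[community].erase vertex) := by
      rw [List.modify_eq_set]
      congr 1
      rw [List.getElem?_eq_getElem hclen]
      simp [PySem.List.remove?_eq_some_erase cl[community] vertex hcmem']
    have hpairs' : pvPairsFrom 0 (cl.modify community (fun l => (PySem.List.remove? l vertex).getD l))
        = (pvPairsFrom 0 cl).erase (vertex, (community : Int)) := by
      rw [hmod, pvPairsFrom_set_erase cl 0 community hclen vertex hcmem']
      norm_num
    have hlen' : (pvPairsFrom 0 (cl.modify community
        (fun l => (PySem.List.remove? l vertex).getD l))).length = k := by
      rw [hpairs', List.length_erase_of_mem hmmem, hlen]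
      omega
    rw [pvSorted2_min_extract hmmem hmlex]
    simp only [pvALoop, hvx, hc]
    rw [ih _ hlen', hpairs']
    rfl

-- ===== VERDICT (by name: the statement is the Claim_ definition above) =====
theorem generate_pajek_communities_spec : Claim_equal_generate_pajek_communities := by
  intro communities _
  unfold Spec_generate_pajek_communities
  unfold generate_pajek_communities generate_pajek_communities_alt
  simp only [pvPairs_eq_pairsFrom]
  have hlen := pvPairsFrom_length communities 0
  rw [pvALoop_eq_sorted _ communities hlen]
  have hl2 : (PySem.List.sorted2 (pvPairsFrom 0 communities)
      (fun p => p.1) (fun p => p.2) false).length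
      = (communities.map (fun vertex => vertex.length)).sum := by
    rw [(PySem.List.sorted2_perm _ _ _ _).length_eq, hlen]
  rw [hl2]
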